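-- pv_equiv track=rewrite | github.com/JanLMoffett/PlayByPlayMiner | PlayByPlayMiner1/Previous Versions/MainStripper4.py | get_pa_id
-- ===== SOURCE A (Python) =====
-- def get_pa_id(action_units, unit_types, team, inning, game_id):
--     r = []
--     d = 0 #element of Plate Appearance ID
--
--     for i,u in enumerate(action_units):
--             if unit_types[i] == "bat":
--                 d += 1
--                 r.append(game_id + team+"0"+str(inning)+"0"+str(d)+"b")
--
--             elif unit_types[i] == "batbr":
--                 d += 1
--                 r.append(game_id + team+"0"+str(inning)+"0"+str(d)+"b")
--
--             elif unit_types[i] == "br":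
--                 r.append(game_id + team+"0"+str(inning)+"0"+str(d)+"b")
--
--             else:
--                 d += 1
--                 r.append(game_id + team+"0"+str(inning)+"0"+str(d)+"s")
--     return r
-- ===== SOURCE B (Python) =====
-- def get_pa_id(action_units, unit_types, team, inning, game_id):
--     # builds the result back-to-front: seed the counter with the TOTAL number of
--     # non-"br" units, walk the types in reverse decrementing it, then reverse once
--     types = unit_types[:len(action_units)]
--     pref = game_id + team + "0" + str(inning) + "0"
--     c = sum(t != "br" for t in types)
--     out = []
--     for t in reversed(types):
--         out.append(pref + str(c) + ("b" if t in ("bat", "batbr", "br") else "s"))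
--         if t != "br":
--             c -= 1
--     out.reverse()
--     return out
-- ===== Notes on version B (the rewrite author's own statement) =====
-- stated objective: alternative
-- what changed: B replaces A's forward stateful four-branch counter loop by a reverse traversal: it seeds the counter with the total number of non-'br' units, walks the types backwards decrementing it (building the output back-to-front), and reverses once; the suffix is chosen by membership in {'bat','batbr','br'}.
import Mathlib
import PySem

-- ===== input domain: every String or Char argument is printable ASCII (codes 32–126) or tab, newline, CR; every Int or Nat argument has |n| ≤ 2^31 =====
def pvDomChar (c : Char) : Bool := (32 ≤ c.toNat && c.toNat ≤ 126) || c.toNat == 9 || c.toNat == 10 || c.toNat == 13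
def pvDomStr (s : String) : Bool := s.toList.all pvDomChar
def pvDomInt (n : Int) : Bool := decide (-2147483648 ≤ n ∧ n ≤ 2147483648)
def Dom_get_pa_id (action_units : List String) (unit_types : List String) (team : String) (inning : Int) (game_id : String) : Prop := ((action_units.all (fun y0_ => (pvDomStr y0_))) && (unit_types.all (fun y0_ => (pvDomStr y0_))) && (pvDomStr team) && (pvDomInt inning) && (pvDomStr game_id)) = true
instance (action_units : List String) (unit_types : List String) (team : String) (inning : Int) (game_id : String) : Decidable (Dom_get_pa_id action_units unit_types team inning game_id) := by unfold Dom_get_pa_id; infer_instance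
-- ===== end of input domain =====

-- B builds the result back-to-front: it seeds the counter with the total non-"br" count,
-- walks the types in reverse decrementing it, and reverses once; same cost class, no speed claim.

-- ===== PORT A =====
-- The loop of A: state (i, d, r); unit_types[i] is a possibly-raising index access
-- (none = IndexError, excluded by Pre_; .getD "" is never reached inside Pre_).
def pvLoopA (unit_types : List String) (team : String) (inning : Int) (game_id : String) :
    List String → Nat → Int → List String → List String
  | [], _, _, r => r
  | _ :: aus, i, d, r =>
    let u := (PySem.List.pyGet? unit_types (i : Int)).getD ""
    if u = "bat" then
      pvLoopA unit_types team inning game_id aus (i + 1) (d + 1)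
        (r ++ [game_id ++ team ++ "0" ++ PySem.Int.toStr inning ++ "0" ++ PySem.Int.toStr (d + 1) ++ "b"])
    else if u = "batbr" then
      pvLoopA unit_types team inning game_id aus (i + 1) (d + 1)
        (r ++ [game_id ++ team ++ "0" ++ PySem.Int.toStr inning ++ "0" ++ PySem.Int.toStr (d + 1) ++ "b"])
    else if u = "br" then
      pvLoopA unit_types team inning game_id aus (i + 1) d
        (r ++ [game_id ++ team ++ "0" ++ PySem.Int.toStr inning ++ "0" ++ PySem.Int.toStr d ++ "b"])
    else
      pvLoopA unit_types team inning game_id aus (i + 1) (d + 1)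
        (r ++ [game_id ++ team ++ "0" ++ PySem.Int.toStr inning ++ "0" ++ PySem.Int.toStr (d + 1) ++ "s"])

def get_pa_id (action_units : List String) (unit_types : List String) (team : String) (inning : Int) (game_id : String) : List String :=
  pvLoopA unit_types team inning game_id action_units 0 0 []

-- ===== PORT B =====
def get_pa_id_alt (action_units : List String) (unit_types : List String) (team : String) (inning : Int) (game_id : String) : List String :=
  let types := PySem.List.slice unit_types none (some (action_units.length : Int))
  let pref := game_id ++ team ++ "0" ++ PySem.Int.toStr inning ++ "0"
  -- c = sum(t != "br" for t in types)
  let c : Int := types.foldl (fun a t => a + (if t ≠ "br" then 1 else 0)) 0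
  -- for t in reversed(types): out.append(...); if t != "br": c -= 1
  let st := types.reverse.foldl
    (fun (p : List String × Int) t =>
      (p.1 ++ [pref ++ PySem.Int.toStr p.2 ++ (if t = "bat" ∨ t = "batbr" ∨ t = "br" then "b" else "s")],
       if t ≠ "br" then p.2 - 1 else p.2))
    ([], c)
  st.1.reverse

-- ===== PRECONDITION & SPEC =====
-- Pre_: A raises IndexError (unit_types[i]) as soon as i reaches len(unit_types) < len(action_units).
def Pre_get_pa_id (action_units : List String) (unit_types : List String) (team : String) (inning : Int) (game_id : String) : Prop :=
  action_units.length ≤ unit_types.length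
instance (action_units : List String) (unit_types : List String) (team : String) (inning : Int) (game_id : String) : Decidable (Pre_get_pa_id action_units unit_types team inning game_id) := by unfold Pre_get_pa_id; infer_instance

def pvWitness_get_pa_id : List String × List String × String × Int × String :=
  (["u", "u", "u"], ["bat", "br", "run"], "NY", 7, "G1")

def Spec_get_pa_id (action_units : List String) (unit_types : List String) (team : String) (inning : Int) (game_id : String) (out : List String) : Prop := out = get_pa_id_alt action_units unit_types team inning game_id
instance (action_units : List String) (unit_types : List String) (team : String) (inning : Int) (game_id : String) (out : List String) : Decidable (Spec_get_pa_id action_units unit_types team inning game_id out) := by unfold Spec_get_pa_id; infer_instance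

-- ===== CLAIM (what is proved, stated in full; the proofs are below) =====
def Claim_equal_get_pa_id : Prop := ∀ (action_units : List String) (unit_types : List String) (team : String) (inning : Int) (game_id : String), Dom_get_pa_id action_units unit_types team inning game_id → Pre_get_pa_id action_units unit_types team inning game_id → Spec_get_pa_id action_units unit_types team inning game_id (get_pa_id action_units unit_types team inning game_id)

-- ===== LEMMAS AND PROOFS =====

-- number of "br" entries among the first i unit types, as an Int
def pvCntI (ut : List String) (i : Nat) : Int := (((ut.take i).count "br" : Nat) : Int)

theorem pvCntI_succ (ut : List String) (i : Nat) (h : i < ut.length) :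
    pvCntI ut (i + 1) = pvCntI ut i + (if ut.getD i "" = "br" then 1 else 0) := by
  unfold pvCntI
  rw [List.take_succ, List.getElem?_eq_getElem h]
  have hgd : ut.getD i "" = ut[i] := by simp [List.getD, List.getElem?_eq_getElem h]
  rw [hgd, List.count_append]
  by_cases hbr : ut[i] = "br" <;> simp [hbr]

-- the common per-index value both programs produce at global index k
def pvG (ut : List String) (team : String) (inning : Int) (gid : String) (k : Nat) : String :=
  gid ++ team ++ "0" ++ PySem.Int.toStr inning ++ "0" ++
  PySem.Int.toStr ((k : Int) + 1 - pvCntI ut (k + 1)) ++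
  (if ut.getD k "" = "bat" ∨ ut.getD k "" = "batbr" ∨ ut.getD k "" = "br" then "b" else "s")

theorem pvLoopA_eq (ut : List String) (team : String) (inning : Int) (gid : String)
    (aus : List String) (i : Nat) (r : List String)
    (hle : i + aus.length ≤ ut.length) :
    pvLoopA ut team inning gid aus i ((i : Int) - pvCntI ut i) r
      = r ++ (List.range' i aus.length).map (pvG ut team inning gid) := by
  induction aus generalizing i r with
  | nil => simp [pvLoopA]
  | cons a aus ih =>
    have hi : i < ut.length := by simp at hle; omega
    have hle' : (i + 1) + aus.length ≤ ut.length := by simp at hle ⊢; omega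
    have hu : (PySem.List.pyGet? ut (i : Int)).getD "" = ut.getD i "" := by
      simp [PySem.List.pyGet?_natCast, List.getD]
    have hcnt := pvCntI_succ ut i hi
    simp only [List.length_cons]
    rw [List.range'_succ, List.map_cons]
    show pvLoopA ut team inning gid (a :: aus) i ((i : Int) - pvCntI ut i) r = _
    simp only [pvLoopA, hu]
    by_cases h1 : ut.getD i "" = "bat"
    · rw [if_pos h1]
      have hif : (if ut.getD i "" = "br" then (1:Int) else 0) = 0 := by rw [h1]; decide
      have ed : (i : Int) - pvCntI ut i + 1 = ((i + 1 : Nat) : Int) - pvCntI ut (i + 1) := by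
        rw [hcnt, hif]; push_cast; ring
      rw [ed, ih (i + 1) _ hle']
      have hs : pvG ut team inning gid i
          = gid ++ team ++ "0" ++ PySem.Int.toStr inning ++ "0" ++ PySem.Int.toStr ((i : Int) - pvCntI ut i + 1) ++ "b" := by
        unfold pvG
        rw [if_pos (by left; exact h1)]
        have : (i : Int) + 1 - pvCntI ut (i + 1) = (i : Int) - pvCntI ut i + 1 := by
          rw [hcnt, hif]; ring
        rw [this]
      rw [hs]; simp; congr 1; rw [hcnt, hif]; ring
    · rw [if_neg h1]
      by_cases h2 : ut.getD i "" = "batbr"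
      · rw [if_pos h2]
        have hif : (if ut.getD i "" = "br" then (1:Int) else 0) = 0 := by rw [h2]; decide
        have ed : (i : Int) - pvCntI ut i + 1 = ((i + 1 : Nat) : Int) - pvCntI ut (i + 1) := by
          rw [hcnt, hif]; push_cast; ring
        rw [ed, ih (i + 1) _ hle']
        have hs : pvG ut team inning gid i
            = gid ++ team ++ "0" ++ PySem.Int.toStr inning ++ "0" ++ PySem.Int.toStr ((i : Int) - pvCntI ut i + 1) ++ "b" := by
          unfold pvG
          rw [if_pos (by right; left; exact h2)]
          have : (i : Int) + 1 - pvCntI ut (i + 1) = (i : Int) - pvCntI ut i + 1 := by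
            rw [hcnt, hif]; ring
          rw [this]
        rw [hs]; simp; congr 1; rw [hcnt, hif]; ring
      · rw [if_neg h2]
        by_cases h3 : ut.getD i "" = "br"
        · rw [if_pos h3]
          have hif : (if ut.getD i "" = "br" then (1:Int) else 0) = 1 := by rw [h3]; decide
          have ed : (i : Int) - pvCntI ut i = ((i + 1 : Nat) : Int) - pvCntI ut (i + 1) := by
            rw [hcnt, hif]; push_cast; ring
          rw [ed, ih (i + 1) _ hle']
          have hs : pvG ut team inning gid i
              = gid ++ team ++ "0" ++ PySem.Int.toStr inning ++ "0" ++ PySem.Int.toStr ((i : Int) - pvCntI ut i) ++ "b" := by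
            unfold pvG
            rw [if_pos (by right; right; exact h3)]
            have : (i : Int) + 1 - pvCntI ut (i + 1) = (i : Int) - pvCntI ut i := by
              rw [hcnt, hif]; ring
            rw [this]
          rw [hs]; simp; congr 1; rw [hcnt, hif]; ring
        · rw [if_neg h3]
          have hif : (if ut.getD i "" = "br" then (1:Int) else 0) = 0 := by rw [if_neg h3]
          have ed : (i : Int) - pvCntI ut i + 1 = ((i + 1 : Nat) : Int) - pvCntI ut (i + 1) := by
            rw [hcnt, hif]; push_cast; ring
          rw [ed, ih (i + 1) _ hle']
          have hs : pvG ut team inning gid i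
              = gid ++ team ++ "0" ++ PySem.Int.toStr inning ++ "0" ++ PySem.Int.toStr ((i : Int) - pvCntI ut i + 1) ++ "s" := by
            unfold pvG
            rw [if_neg (by intro hc; rcases hc with h | h | h; exacts [h1 h, h2 h, h3 h])]
            have : (i : Int) + 1 - pvCntI ut (i + 1) = (i : Int) - pvCntI ut i + 1 := by
              rw [hcnt, hif]; ring
            rw [this]
          rw [hs]; simp; congr 1; rw [hcnt, hif]; ring

theorem get_pa_id_eq_map (au ut : List String) (team : String) (inning : Int) (gid : String)
    (h : au.length ≤ ut.length) :
    get_pa_id au ut team inning gid = (List.range au.length).map (pvG ut team inning gid) := by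
  unfold get_pa_id
  rw [List.range_eq_range']
  have h2 := pvLoopA_eq ut team inning gid au 0 [] (by omega)
  simpa [pvCntI] using h2

-- ----- B side -----

-- total non-"br" count as an Int
def pvNB (ts : List String) : Int := ((ts.countP (fun t => t ≠ "br") : Nat) : Int)

theorem pvNB_cons (t : String) (ts : List String) :
    pvNB (t :: ts) = (if t ≠ "br" then 1 else 0) + pvNB ts := by
  unfold pvNB
  by_cases h : t = "br" <;> simp [List.countP_cons, h] <;> push_cast <;> ring

theorem pvNB_append_singleton (ts : List String) (t : String) :
    pvNB (ts ++ [t]) = pvNB ts + (if t ≠ "br" then 1 else 0) := by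
  unfold pvNB
  by_cases h : t = "br" <;> simp [List.countP_append, List.countP_cons, h]

theorem foldl_sum_nb (ts : List String) : ∀ a : Int,
    ts.foldl (fun a t => a + (if t ≠ "br" then 1 else 0)) a = a + pvNB ts := by
  induction ts with
  | nil => intro a; simp [pvNB]
  | cons t ts ih => intro a; simp only [List.foldl_cons]; rw [ih, pvNB_cons]; ring

-- pvNB over a prefix relates to the "br" count used by pvG
theorem pvNB_take (ut : List String) (k : Nat) (hk : k < ut.length) :
    pvNB (ut.take (k + 1)) = (k : Int) + 1 - pvCntI ut (k + 1) := by
  unfold pvNB pvCntI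
  have hcnt : (ut.take (k+1)).countP (fun t => t ≠ "br") + (ut.take (k+1)).count "br"
      = (ut.take (k+1)).length := by
    generalize ut.take (k+1) = l
    induction l with
    | nil => simp
    | cons t ts ih =>
      by_cases h : t = "br" <;>
        simp [List.count_cons, List.countP_cons, h] at ih ⊢ <;> omega
  have hlen : (ut.take (k+1)).length = k + 1 := by simp; omega
  omega

-- the emissions of B's reverse loop, as a standalone recursion
def pvEmitRev (pref : String) : List String → Int → List String
  | [], _ => []
  | t :: ts, c =>
    (pref ++ PySem.Int.toStr c ++ (if t = "bat" ∨ t = "batbr" ∨ t = "br" then "b" else "s"))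
      :: pvEmitRev pref ts (if t ≠ "br" then c - 1 else c)

theorem foldl_emitRev (pref : String) (rs : List String) : ∀ (out : List String) (c : Int),
    (rs.foldl
      (fun (p : List String × Int) t =>
        (p.1 ++ [pref ++ PySem.Int.toStr p.2 ++ (if t = "bat" ∨ t = "batbr" ∨ t = "br" then "b" else "s")],
         if t ≠ "br" then p.2 - 1 else p.2))
      (out, c)).1 = out ++ pvEmitRev pref rs c := by
  induction rs with
  | nil => intro out c; simp [pvEmitRev]
  | cons t ts ih => intro out c; simp only [List.foldl_cons]; rw [ih]; simp [pvEmitRev]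

theorem pvG_append (ts : List String) (t : String) (team : String) (inning : Int) (gid : String)
    (k : Nat) (hk : k < ts.length) :
    pvG (ts ++ [t]) team inning gid k = pvG ts team inning gid k := by
  unfold pvG pvCntI
  rw [List.take_append_of_le_length (by omega), List.getD_append _ _ _ _ (by omega)]

theorem emitRev_eq (team : String) (inning : Int) (gid : String) (ts : List String) :
    pvEmitRev (gid ++ team ++ "0" ++ PySem.Int.toStr inning ++ "0") ts.reverse (pvNB ts)
      = ((List.range ts.length).map (pvG ts team inning gid)).reverse := by
  induction ts using List.reverseRecOn with
  | nil => simp [pvEmitRev]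
  | append_singleton ts t ih =>
    rw [List.reverse_append, List.reverse_singleton, List.singleton_append]
    have hnb : pvNB (ts ++ [t]) = pvNB ts + (if t ≠ "br" then 1 else 0) :=
      pvNB_append_singleton ts t
    have hstep : (if t ≠ "br" then pvNB (ts ++ [t]) - 1 else pvNB (ts ++ [t])) = pvNB ts := by
      by_cases h : t = "br" <;> simp [h] at hnb ⊢ <;> omega
    rw [show pvEmitRev (gid ++ team ++ "0" ++ PySem.Int.toStr inning ++ "0")
          (t :: ts.reverse) (pvNB (ts ++ [t]))
        = (gid ++ team ++ "0" ++ PySem.Int.toStr inning ++ "0"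
             ++ PySem.Int.toStr (pvNB (ts ++ [t]))
             ++ (if t = "bat" ∨ t = "batbr" ∨ t = "br" then "b" else "s"))
          :: pvEmitRev (gid ++ team ++ "0" ++ PySem.Int.toStr inning ++ "0") ts.reverse
               (if t ≠ "br" then pvNB (ts ++ [t]) - 1 else pvNB (ts ++ [t])) from rfl]
    rw [hstep, ih]
    have hlen : (ts ++ [t]).length = ts.length + 1 := by simp
    rw [hlen, List.range_succ, List.map_append, List.reverse_append]
    simp only [List.map_cons, List.map_nil, List.reverse_cons, List.reverse_nil,
      List.nil_append, List.singleton_append]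
    have hmap : (List.range ts.length).map (pvG (ts ++ [t]) team inning gid)
        = (List.range ts.length).map (pvG ts team inning gid) := by
      apply List.map_congr_left
      intro k hkmem
      exact pvG_append ts t team inning gid k (List.mem_range.mp hkmem)
    rw [hmap]
    have hhead : pvG (ts ++ [t]) team inning gid ts.length
        = gid ++ team ++ "0" ++ PySem.Int.toStr inning ++ "0"
            ++ PySem.Int.toStr (pvNB (ts ++ [t]))
            ++ (if t = "bat" ∨ t = "batbr" ∨ t = "br" then "b" else "s") := by
      unfold pvG
      have hget : (ts ++ [t]).getD ts.length "" = t := by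
        simp [List.getD]
      rw [hget]
      have hval : (ts.length : Int) + 1 - pvCntI (ts ++ [t]) (ts.length + 1)
          = pvNB (ts ++ [t]) := by
        have := pvNB_take (ts ++ [t]) ts.length (by simp)
        rw [List.take_of_length_le (by simp)] at this
        omega
      rw [hval]
    rw [hhead]

theorem get_pa_id_alt_eq_map (au ut : List String) (team : String) (inning : Int) (gid : String)
    (h : au.length ≤ ut.length) :
    get_pa_id_alt au ut team inning gid = (List.range au.length).map (pvG ut team inning gid) := by
  unfold get_pa_id_alt
  rw [PySem.List.slice_to_natCast]
  dsimp only
  have hlen : (ut.take au.length).length = au.length := by simp; omega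
  rw [foldl_sum_nb]
  rw [show (0 : Int) + pvNB (ut.take au.length) = pvNB (ut.take au.length) by ring]
  rw [foldl_emitRev]
  rw [List.nil_append]
  rw [emitRev_eq team inning gid (ut.take au.length)]
  rw [List.reverse_reverse, hlen]
  apply List.map_congr_left
  intro k hkmem
  have hk : k < au.length := List.mem_range.mp hkmem
  unfold pvG pvCntI
  rw [List.take_take, min_eq_left (by omega)]
  rw [List.getD_eq_getElem?_getD, List.getD_eq_getElem?_getD,
      List.getElem?_take_of_lt (by omega)]

-- ===== VERDICT (by name: the statement is the Claim_ definition above) =====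
theorem get_pa_id_spec : Claim_equal_get_pa_id := by
  intro au ut team inning gid _hdom hpre
  unfold Spec_get_pa_id
  rw [get_pa_id_eq_map au ut team inning gid hpre, get_pa_id_alt_eq_map au ut team inning gid hpre]
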